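-- pv_equiv track=rewrite | github.com/Airyshtoteles/learnLeetCode | Day31/Part6/shifted_grid_collapse.py | explode_column
-- ===== SOURCE A (Python) =====
-- from typing import List, Tuple
--
-- def explode_column(col: List[int]) -> Tuple[List[int], int, bool]:
--     # return new col after one explosion pass, destroyed count, whether any exploded
--     n = len(col)
--     to_zero = [False]*n
--     i = 0
--     destroyed = 0
--     while i < n:
--         j = i
--         while j < n and col[j] == col[i] and col[i] != 0:
--             j += 1
--         run_len = j - i
--         if col[i] != 0 and run_len >= 3:
--             for t in range(i, j):
--                 to_zero[t] = True
--             destroyed += run_len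
--         i = j if j > i else i + 1
--     new_col = [0 if to_zero[r] else col[r] for r in range(n)]
--     return new_col, destroyed, any(to_zero)
-- ===== SOURCE B (Python) =====
-- from typing import List, Tuple
--
-- def explode_column(col: List[int]) -> Tuple[List[int], int, bool]:
--     # A cell explodes iff it lies inside some window of 3 consecutive equal
--     # nonzero cells: a purely local per-index test, no run-length scanning.
--     n = len(col)
--
--     def boom(i: int) -> bool:
--         return col[i] != 0 and (
--             (i >= 2 and col[i - 2] == col[i - 1] == col[i])
--             or (1 <= i <= n - 2 and col[i - 1] == col[i] == col[i + 1])
--             or (i <= n - 3 and col[i] == col[i + 1] == col[i + 2])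
--         )
--
--     bs = [boom(i) for i in range(n)]
--     return [0 if b else v for b, v in zip(bs, col)], sum(bs), any(bs)
-- ===== Notes on version B (the rewrite author's own statement) =====
-- stated objective: alternative
-- what changed: Replaces A's run-scanning two-pointer pass with to_zero mask and rebuild by a purely local per-cell rule: each cell is cleared iff it lies in some window of three consecutive equal nonzero cells, so no run lengths, mask mutation or grouping are computed at all.
import Mathlib
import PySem

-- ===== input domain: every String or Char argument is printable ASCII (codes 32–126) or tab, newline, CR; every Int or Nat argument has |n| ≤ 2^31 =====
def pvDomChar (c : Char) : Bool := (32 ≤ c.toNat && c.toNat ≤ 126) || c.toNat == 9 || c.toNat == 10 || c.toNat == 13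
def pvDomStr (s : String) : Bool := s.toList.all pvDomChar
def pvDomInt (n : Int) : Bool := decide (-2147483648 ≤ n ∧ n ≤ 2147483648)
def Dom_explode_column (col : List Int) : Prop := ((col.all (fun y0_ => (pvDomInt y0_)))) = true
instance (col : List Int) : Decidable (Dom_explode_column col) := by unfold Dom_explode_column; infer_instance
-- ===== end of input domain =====

-- B replaces A's run-scanning pointer pass + to_zero mask by a purely local per-cell
-- rule (cell cleared iff inside some 3-window of equal nonzero cells); same cost.

-- ===== PORT A =====
-- inner while: 'while j < n and col[j] == col[i] and col[i] != 0: j += 1'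
def pvInnerJ (col : List Int) (vi : Int) (n j : Nat) : Nat :=
  if j < n ∧ col.getD j 0 = vi ∧ vi ≠ 0 then pvInnerJ col vi n (j + 1) else j
termination_by n - j
decreasing_by omega

-- outer while loop over i, maintaining (to_zero, destroyed)
def pvOuter (col : List Int) (n : Nat) (tz : List Bool) (i : Nat) (destroyed : Int) :
    List Bool × Int :=
  if _h : i < n then
    let vi := col.getD i 0
    let j := pvInnerJ col vi n i
    let run_len := j - i
    let st :=
      if vi ≠ 0 ∧ 3 ≤ run_len then
        ((List.range' i run_len).foldl (fun t a => t.set a true) tz,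
         destroyed + (run_len : Int))
      else (tz, destroyed)
    pvOuter col n st.1 (if i < j then j else i + 1) st.2
  else (tz, destroyed)
termination_by n - i
decreasing_by split <;> omega

def explode_column (col : List Int) : List Int × Int × Bool :=
  let n := col.length
  let st := pvOuter col n (List.replicate n false) 0 0
  ((List.range n).map (fun r => if st.1.getD r false then 0 else col.getD r 0),
   st.2, st.1.any id)

-- ===== PORT B =====
-- 'boom(i)': col[i] != 0 and one of the three 3-windows containing i is constant
def pvBoom (col : List Int) (n : Nat) (i : Nat) : Bool :=
  (col.getD i 0 != 0) &&
    ((decide (2 ≤ i) && (col.getD (i - 2) 0 == col.getD (i - 1) 0)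
        && (col.getD (i - 1) 0 == col.getD i 0)) ||
     (decide (1 ≤ i ∧ i + 2 ≤ n) && (col.getD (i - 1) 0 == col.getD i 0)
        && (col.getD i 0 == col.getD (i + 1) 0)) ||
     (decide (i + 3 ≤ n) && (col.getD i 0 == col.getD (i + 1) 0)
        && (col.getD (i + 1) 0 == col.getD (i + 2) 0)))

def explode_column_alt (col : List Int) : List Int × Int × Bool :=
  let n := col.length
  let bs := (List.range n).map (fun i => pvBoom col n i)
  (List.zipWith (fun b v => if b then 0 else v) bs col,
   bs.foldl (fun a b => a + (if b then (1 : Int) else 0)) 0,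
   bs.any id)

-- ===== PRECONDITION & SPEC =====
def Spec_explode_column (col : List Int) (out : List Int × Int × Bool) : Prop := out = explode_column_alt col
instance (col : List Int) (out : List Int × Int × Bool) : Decidable (Spec_explode_column col out) := by unfold Spec_explode_column; infer_instance

-- ===== CLAIM (what is proved, stated in full; the proofs are below) =====
def Claim_equal_explode_column : Prop := ∀ (col : List Int), Dom_explode_column col → Spec_explode_column col (explode_column col)

-- ===== LEMMAS AND PROOFS =====

-- the explosion mask and destroyed count, computed run by run (proof-only helper)
def pvMaskD : List Int → List Bool × Int
  | [] => ([], 0)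
  | x :: xs =>
    let r := (xs.takeWhile (fun y => y == x)).length + 1
    let rest := xs.dropWhile (fun y => y == x)
    let md := pvMaskD rest
    if x ≠ 0 ∧ 3 ≤ r then (List.replicate r true ++ md.1, (r : Int) + md.2)
    else (List.replicate r false ++ md.1, md.2)
termination_by l => l.length
decreasing_by
  exact Nat.lt_succ_of_le (List.length_dropWhile_le _ _)

theorem pv_dropWhile_eq_drop {α : Type} (p : α → Bool) (l : List α) :
    l.dropWhile p = l.drop (l.takeWhile p).length := by
  induction l with
  | nil => simp
  | cons x xs ih =>
    by_cases hp : p x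
    · simp [hp, ih]
    · simp [hp]

theorem pv_takeWhile_replicate (x : Int) (xs : List Int) :
    xs.takeWhile (fun y => y == x) =
      List.replicate (xs.takeWhile (fun y => y == x)).length x := by
  rw [List.eq_replicate_iff]
  refine ⟨rfl, fun b hb => ?_⟩
  have := List.mem_takeWhile_imp hb
  simpa using this

theorem pvMaskD_length_aux : ∀ (n : Nat) (l : List Int), l.length ≤ n →
    (pvMaskD l).1.length = l.length := by
  intro n
  induction n with
  | zero =>
    intro l hl
    have : l = [] := List.eq_nil_of_length_eq_zero (by omega)
    subst this; simp [pvMaskD]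
  | succ n ih =>
    intro l hl
    cases l with
    | nil => simp [pvMaskD]
    | cons x xs =>
      rw [pvMaskD]
      have hlen := congrArg List.length
        (List.takeWhile_append_dropWhile (p := fun y => y == x) (l := xs))
      simp only [List.length_append] at hlen
      have hd : (xs.dropWhile (fun y => y == x)).length ≤ n := by
        have := List.length_dropWhile_le (fun y => y == x) xs
        simp at hl; omega
      have := ih (xs.dropWhile (fun y => y == x)) hd
      split <;> simp [List.length_append, this] <;> omega

theorem pvMaskD_length (l : List Int) : (pvMaskD l).1.length = l.length :=
  pvMaskD_length_aux l.length l (le_refl _)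

-- pvMaskD groups a zero run; relate it to the singly-peeled form
theorem pvMaskD_zeros (zs : List Int) :
    (pvMaskD zs).1 =
      List.replicate ((zs.takeWhile (fun y => y == (0:Int))).length) false ++
        (pvMaskD (zs.dropWhile (fun y => y == (0:Int)))).1 ∧
    (pvMaskD zs).2 = (pvMaskD (zs.dropWhile (fun y => y == (0:Int)))).2 := by
  cases zs with
  | nil => simp [pvMaskD]
  | cons y ys =>
    by_cases hy : y = 0
    · subst hy
      rw [pvMaskD]
      simp [List.replicate_succ]
    · simp [hy]

-- unfolding lemma: pvMaskD peels a single zero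
theorem pvMaskD_zero_cons (zs : List Int) :
    pvMaskD (0 :: zs) = (false :: (pvMaskD zs).1, (pvMaskD zs).2) := by
  obtain ⟨h1, h2⟩ := pvMaskD_zeros zs
  rw [pvMaskD]
  simp [h1, h2, List.replicate_succ, List.cons_append]

-- characterization of the inner while loop
theorem pvInnerJ_char (col : List Int) (vi : Int) (hvi : vi ≠ 0) :
    ∀ (n j : Nat), n = col.length → j ≤ n →
      pvInnerJ col vi n j = j + ((col.drop j).takeWhile (fun y => y == vi)).length := by
  intro n j
  induction j using pvInnerJ.induct (col := col) (vi := vi) (n := n) with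
  | case1 j hcond ih =>
    intro hn hj
    obtain ⟨hjn, hget, _⟩ := hcond
    rw [pvInnerJ, if_pos ⟨hjn, hget, hvi⟩]
    have hjlt : j < col.length := by omega
    have hdrop : col.drop j = col[j] :: col.drop (j + 1) := by
      rw [List.drop_eq_getElem_cons hjlt]
    have hgj : col[j] = vi := by
      rw [List.getD_eq_getElem _ _ hjlt] at hget; exact hget
    rw [ih hn (by omega), hdrop, List.takeWhile_cons, hgj]
    simp
    omega
  | case2 j hcond =>
    intro hn hj
    rw [pvInnerJ, if_neg hcond]
    by_cases hjn : j < n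
    · have hjlt : j < col.length := by omega
      have hget : col.getD j 0 ≠ vi := by
        intro h; exact hcond ⟨hjn, h, hvi⟩
      have hgj : col[j] ≠ vi := by
        rw [List.getD_eq_getElem _ _ hjlt] at hget; exact hget
      rw [List.drop_eq_getElem_cons hjlt, List.takeWhile_cons]
      simp [hgj]
    · have : col.drop j = [] := by
        apply List.drop_eq_nil_of_le; omega
      simp [this]

theorem pvInnerJ_zero (col : List Int) (n j : Nat) : pvInnerJ col 0 n j = j := by
  rw [pvInnerJ]; simp

-- shape of the to_zero list after the marking for-loop
theorem pvFoldSet_shape :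
    ∀ (r : Nat) (A S : List Bool), r ≤ S.length →
      (List.range' A.length r).foldl (fun t a => t.set a true) (A ++ S) =
        A ++ List.replicate r true ++ S.drop r := by
  intro r
  induction r with
  | zero => intro A S _; simp
  | succ r ih =>
    intro A S hr
    cases S with
    | nil => simp at hr
    | cons s S' =>
      rw [List.range'_succ, List.foldl_cons]
      have hset : (A ++ s :: S').set A.length true = (A ++ [true]) ++ S' := by
        rw [List.set_append]
        simp
      rw [hset]
      have := ih (A ++ [true]) S' (by simpa using hr)
      rw [List.length_append] at this
      simp only [List.length_nil, List.length_cons, Nat.zero_add] at this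
      rw [this, List.drop_succ_cons]
      simp [List.replicate_succ, List.append_assoc]

-- one unfolding step of the outer loop (i < n)
theorem pvOuter_step (col : List Int) (n : Nat) (tz : List Bool) (i : Nat) (d : Int)
    (h : i < n) :
    pvOuter col n tz i d =
      (if col.getD i 0 ≠ 0 ∧ 3 ≤ pvInnerJ col (col.getD i 0) n i - i then
        pvOuter col n
          ((List.range' i (pvInnerJ col (col.getD i 0) n i - i)).foldl (fun t a => t.set a true) tz)
          (if i < pvInnerJ col (col.getD i 0) n i then pvInnerJ col (col.getD i 0) n i else i + 1)
          (d + ((pvInnerJ col (col.getD i 0) n i - i : Nat) : Int))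
      else
        pvOuter col n tz
          (if i < pvInnerJ col (col.getD i 0) n i then pvInnerJ col (col.getD i 0) n i else i + 1)
          d) := by
  rw [pvOuter, dif_pos h]
  by_cases hc : col.getD i 0 ≠ 0 ∧ 3 ≤ pvInnerJ col (col.getD i 0) n i - i
  · simp only [if_pos hc]
  · simp only [if_neg hc]

-- characterization of the outer while loop
theorem pvOuter_char (col : List Int) :
    ∀ (k : Nat) (tz : List Bool) (i : Nat) (d : Int),
      col.length - i = k → tz.length = col.length → i ≤ col.length →
      tz.drop i = List.replicate (col.length - i) false →
      pvOuter col col.length tz i d =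
        (tz.take i ++ (pvMaskD (col.drop i)).1, d + (pvMaskD (col.drop i)).2) := by
  intro k
  induction k using Nat.strong_induction_on with
  | _ k IH =>
    intro tz i d hk hlen hle hdrop
    by_cases hi : i < col.length
    · have hdropi : col.drop i = col[i] :: col.drop (i + 1) := List.drop_eq_getElem_cons hi
      have hvi : col.getD i 0 = col[i] := List.getD_eq_getElem _ _ hi
      rw [pvOuter_step col col.length tz i d hi]
      by_cases hz : col[i] = 0
      · -- zero cell: inner loop does not move, advance by one
        have hj : pvInnerJ col (col.getD i 0) col.length i = i := by
          rw [hvi, hz]; exact pvInnerJ_zero _ _ _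
        rw [hj, if_neg (fun hcc => absurd hcc.2 (by omega)), if_neg (lt_irrefl i)]
        have htzi : tz.drop (i+1) = List.replicate (col.length - i - 1) false := by
          rw [show tz.drop (i+1) = (tz.drop i).drop 1 from by rw [List.drop_drop], hdrop,
            List.drop_replicate]
        rw [IH (col.length - (i+1)) (by omega) tz (i+1) d rfl hlen (by omega) htzi]
        have htake : tz.take (i+1) = tz.take i ++ [false] := by
          have h0 := congrArg (fun l => l[0]?) hdrop
          simp only [List.getElem?_drop, Nat.add_zero] at h0
          have hrep : (List.replicate (col.length - i) false)[0]? = some false := by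
            rw [List.getElem?_replicate, if_pos (by omega)]
          rw [List.take_add_one, h0, hrep]
          rfl
        rw [hdropi, hz, pvMaskD_zero_cons]
        simp [htake, List.append_assoc]
      · -- nonzero cell: inner loop scans the whole run
        set t := ((col.drop (i+1)).takeWhile (fun y => y == col[i])).length with ht
        set r := t + 1 with hr
        have hj : pvInnerJ col (col.getD i 0) col.length i = i + r := by
          rw [hvi, pvInnerJ_char col col[i] hz col.length i rfl (by omega)]
          rw [hdropi, List.takeWhile_cons]
          simp [← ht, hr]
        have htle : t ≤ col.length - (i+1) := by
          have h1 := congrArg List.length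
            (List.takeWhile_append_dropWhile (p := fun y => y == col[i]) (l := col.drop (i+1)))
          simp only [List.length_append, List.length_drop] at h1
          rw [← ht] at h1
          omega
        have hjle : i + r ≤ col.length := by omega
        have hrest : (col.drop (i+1)).dropWhile (fun y => y == col[i]) = col.drop (i + r) := by
          rw [pv_dropWhile_eq_drop, List.drop_drop, ← ht]
          congr 1
          omega
        have hmask : pvMaskD (col.drop i) =
            (if col[i] ≠ 0 ∧ 3 ≤ r then
              (List.replicate r true ++ (pvMaskD (col.drop (i + r))).1,
               (r : Int) + (pvMaskD (col.drop (i + r))).2)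
             else
              (List.replicate r false ++ (pvMaskD (col.drop (i + r))).1,
               (pvMaskD (col.drop (i + r))).2)) := by
          rw [hdropi, pvMaskD]
          simp only [← ht, ← hr, hrest]
        rw [hj, hvi, Nat.add_sub_cancel_left, if_pos (show i < i + r by omega)]
        by_cases hcond : col[i] ≠ 0 ∧ 3 ≤ r
        · rw [if_pos hcond]
          -- marking branch
          have htzsplit : tz = tz.take i ++ List.replicate (col.length - i) false := by
            conv_lhs => rw [← List.take_append_drop i tz]
            rw [hdrop]
          have hAlen : (tz.take i).length = i := by
            rw [List.length_take]; omega
          have hfold0 := pvFoldSet_shape r (tz.take i) (List.replicate (col.length - i) false)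
            (by simp; omega)
          rw [hAlen, ← htzsplit, List.drop_replicate] at hfold0
          rw [hfold0]
          set tz' := tz.take i ++ List.replicate r true ++ List.replicate (col.length - i - r) false with htz'
          have hlen' : tz'.length = col.length := by
            rw [htz']
            simp only [List.length_append, List.length_replicate, hAlen]
            omega
          have hdrop' : tz'.drop (i + r) = List.replicate (col.length - (i + r)) false := by
            rw [htz', List.drop_left' (by simp [hAlen])]
            congr 1
            omega
          rw [IH (col.length - (i + r)) (by omega) tz' (i + r) (d + (r : Int)) rfl hlen' hjle hdrop']
          have htake' : tz'.take (i + r) = tz.take i ++ List.replicate r true := by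
            rw [htz']
            exact List.take_left' (by simp [hAlen])
          rw [htake', hmask, if_pos hcond]
          refine Prod.ext ?_ ?_
          · simp [List.append_assoc]
          · simp
            ring
        · rw [if_neg hcond]
          have hdropj : tz.drop (i + r) = List.replicate (col.length - (i + r)) false := by
            have h1 : tz.drop (i + r) = (tz.drop i).drop r := by rw [List.drop_drop]
            rw [h1, hdrop, List.drop_replicate]
            congr 1; omega
          rw [IH (col.length - (i + r)) (by omega) tz (i + r) d rfl hlen hjle hdropj]
          have htakej : tz.take (i + r) = tz.take i ++ List.replicate r false := by
            conv_lhs => rw [← List.take_append_drop i tz]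
            rw [List.take_append, List.length_take, hdrop]
            have h1 : min i tz.length = i := by omega
            rw [List.take_take, List.take_replicate]
            congr 2
            · omega
            · omega
          rw [htakej, hmask, if_neg hcond]
          simp [List.append_assoc]
    · rw [pvOuter, dif_neg hi]
      have hnil : col.drop i = [] := by
        apply List.drop_eq_nil_of_le; omega
      rw [hnil]
      simp [pvMaskD, List.take_of_length_le (show tz.length ≤ i by omega)]

-- A computes (zipWith of mask, destroyed, any mask)
theorem explode_column_eq_mask (col : List Int) :
    explode_column col =
      (List.zipWith (fun b c => if b then 0 else c) (pvMaskD col).1 col,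
       (pvMaskD col).2, (pvMaskD col).1.any id) := by
  have h := pvOuter_char col (col.length) (List.replicate col.length false) 0 0
      (by omega) (by simp) (by omega) (by simp)
  simp only [List.drop_zero, List.take_zero, List.nil_append, zero_add] at h
  simp only [explode_column]
  rw [h]
  refine Prod.ext ?_ rfl
  simp only
  apply List.ext_getElem
  · simp [pvMaskD_length col]
  · intro k h1 h2
    have hk : k < col.length := by simpa using h1
    have hm : k < (pvMaskD col).1.length := by rw [pvMaskD_length]; exact hk
    simp [List.getElem_zipWith, List.getD_eq_getElem?_getD,
      List.getElem?_eq_getElem hm, List.getElem?_eq_getElem hk]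

-- ===== B-side lemmas =====

-- head of dropWhile (== x) differs from x
theorem pv_dropWhile_head_ne (x : Int) (xs : List Int)
    (h : xs.dropWhile (fun y => y == x) ≠ []) :
    (xs.dropWhile (fun y => y == x)).getD 0 0 ≠ x := by
  induction xs with
  | nil => simp at h
  | cons a as ih =>
    by_cases ha : a = x
    · rw [List.dropWhile_cons] at h ⊢
      simp only [ha, beq_self_eq_true] at h ⊢
      exact ih h
    · rw [List.dropWhile_cons] at h ⊢
      simp only [beq_eq_false_iff_ne.mpr ha]
      simpa using ha

-- getD of the run-decomposed list
theorem pv_getD_split (x : Int) (r : Nat) (rest : List Int) (j : Nat) :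
    (List.replicate r x ++ rest).getD j 0 =
      if j < r then x else rest.getD (j - r) 0 := by
  by_cases hj : j < r
  · rw [if_pos hj, List.getD_append _ _ _ _ (by simpa using hj)]
    simp [List.getD_eq_getElem?_getD, hj]
  · rw [if_neg hj, List.getD_append_right _ _ _ _ (by simpa using Nat.le_of_not_lt hj)]
    simp

-- the local window test on a run decomposition: run part
theorem pvBoom_run (x : Int) (r m : Nat) (rest : List Int)
    (hr : 1 ≤ r) (hm : rest.length = m)
    (hhead : rest ≠ [] → rest.getD 0 0 ≠ x)
    (i : Nat) (hi : i < r) :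
    pvBoom (List.replicate r x ++ rest) (r + m) i = decide (x ≠ 0 ∧ 3 ≤ r) := by
  have hget := pv_getD_split x r rest
  simp only [pvBoom, hget]
  have hrest0 : m ≠ 0 → ((rest.getD 0 0 == x) = false) := by
    intro hm0
    have : rest ≠ [] := by
      intro hnil; rw [hnil] at hm; simp at hm; omega
    simpa using (hhead this)
  by_cases hx : x = 0
  · subst hx; simp [if_pos hi]
  · have hxb : ((if i < r then x else rest.getD (i - r) 0) != 0) = true := by
      simp [if_pos hi, hx]
    by_cases h3 : 3 ≤ r
    · -- some window inside the run fires
      have hres : decide (x ≠ 0 ∧ 3 ≤ r) = true := by simp [hx, h3]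
      rw [hres]
      by_cases h2 : 2 ≤ i
      · -- window (i-2, i-1, i)
        have e1 : i - 2 < r := by omega
        have e2 : i - 1 < r := by omega
        simp [if_pos hi, if_pos e1, if_pos e2, h2, hx]
      · interval_cases i
        · -- i = 0: window (0,1,2)
          have e1 : 1 < r := by omega
          have e2 : 2 < r := by omega
          have hg : 0 + 3 ≤ r + m := by omega
          simp [if_pos hi, if_pos e1, if_pos e2, hg, hx]
        · -- i = 1: window (0,1,2)
          have e0 : (0:Nat) < r := by omega
          have e2 : 2 < r := by omega
          have hg : 1 + 2 ≤ r + m := by omega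
          simp [if_pos hi, if_pos e0, if_pos e2, hg, hx]
    · -- r ≤ 2: no window fires
      have hres : decide (x ≠ 0 ∧ 3 ≤ r) = false := by simp [h3]
      rw [hres, hxb]
      have hi2 : ¬ 2 ≤ i := by omega
      simp only [Bool.true_and, decide_eq_false hi2, Bool.false_and, Bool.false_or]
      -- guard 2 and guard 3 both fail
      apply Bool.or_eq_false_iff.mpr
      constructor
      · -- middle window
        by_cases hgd : 1 ≤ i ∧ i + 2 ≤ r + m
        · -- then i = 1, r = 2, i+1 = r: chain x == rest[0] fails
          have hi1 : i = 1 := by omega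
          have hr2 : r = 2 := by omega
          have hm1 : rest ≠ [] := by
            intro hnil; rw [hnil] at hm; simp at hm; omega
          have hP : ¬ x = rest[0]?.getD 0 := by
            have h' := hhead hm1
            rw [List.getD_eq_getElem?_getD] at h'
            exact fun h => h' h.symm
          subst hi1; subst hr2
          simp [hP]
        · simp [decide_eq_false hgd]
      · -- right window
        by_cases hgd : i + 3 ≤ r + m
        · -- one of i+1, i+2 crosses the run boundary into rest's head
          by_cases hb : i + 1 < r
          · -- then i + 2 = r (since i < r ≤ 2 and i+1 < r forces i = 0, r = 2)
            have hi0 : i = 0 := by omega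
            have hr2 : r = 2 := by omega
            have hm1 : rest ≠ [] := by
              intro hnil; rw [hnil] at hm; simp at hm; omega
            have hP : ¬ x = rest[0]?.getD 0 := by
              have h' := hhead hm1
              rw [List.getD_eq_getElem?_getD] at h'
              exact fun h => h' h.symm
            subst hi0; subst hr2
            simp [hP]
          · -- i + 1 ≥ r: chain x == rest[0] fails at the first step
            have hi1r : i + 1 - r = 0 := by omega
            have hm1 : rest ≠ [] := by
              intro hnil; rw [hnil] at hm; simp at hm; omega
            have hP : ¬ x = rest[0]?.getD 0 := by
              have h' := hhead hm1
              rw [List.getD_eq_getElem?_getD] at h'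
              exact fun h => h' h.symm
            simp [if_pos hi, if_neg hb, hi1r, hP]
        · simp [decide_eq_false hgd]

-- the local window test on a run decomposition: tail part
theorem pvBoom_shift (x : Int) (r m : Nat) (rest : List Int)
    (hr : 1 ≤ r) (hm : rest.length = m)
    (hhead : rest ≠ [] → rest.getD 0 0 ≠ x)
    (k : Nat) (hk : k < m) :
    pvBoom (List.replicate r x ++ rest) (r + m) (r + k) = pvBoom rest m k := by
  have hget := pv_getD_split x r rest
  have hm1 : rest ≠ [] := by
    intro hnil; rw [hnil] at hm; simp at hm; omega
  have hrest0 : ((rest.getD 0 0 == x) = false) := by simpa using hhead hm1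
  have hP : ¬ x = rest[0]?.getD 0 := by
    have h' := hhead hm1
    rw [List.getD_eq_getElem?_getD] at h'
    exact fun h => h' h.symm
  simp only [pvBoom, hget]
  have hik : ¬ (r + k < r) := by omega
  have hik1 : ¬ (r + k + 1 < r) := by omega
  have hik2 : ¬ (r + k + 2 < r) := by omega
  have ek : r + k - r = k := by omega
  have ek1 : r + k + 1 - r = k + 1 := by omega
  have ek2 : r + k + 2 - r = k + 2 := by omega
  have eg2 : (1 ≤ r + k ∧ r + k + 2 ≤ r + m) ↔ (1 ≤ k ∧ k + 2 ≤ m) ∨ (k = 0) ∧ k + 2 ≤ m := by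
    constructor
    · intro h; by_cases hk0 : k = 0
      · right; exact ⟨hk0, by omega⟩
      · left; omega
    · intro h; rcases h with h | h <;> omega
  have eg3 : (r + k + 3 ≤ r + m) ↔ (k + 3 ≤ m) := by omega
  simp only [if_neg hik, if_neg hik1, if_neg hik2, ek, ek1, ek2]
  congr 1
  -- now compare the three guards
  by_cases hk2 : 2 ≤ k
  · -- all window indices land in rest
    have e1 : ¬ (r + k - 2 < r) := by omega
    have e2 : ¬ (r + k - 1 < r) := by omega
    have f1 : r + k - 2 - r = k - 2 := by omega
    have f2 : r + k - 1 - r = k - 1 := by omega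
    have g1 : (2 ≤ r + k) := by omega
    have g2 : (1 ≤ r + k ∧ r + k + 2 ≤ r + m) ↔ (1 ≤ k ∧ k + 2 ≤ m) := by omega
    simp only [if_neg e1, if_neg e2, f1, f2, decide_eq_true g1, decide_eq_true (show 2 ≤ k by omega)]
    rw [show (decide (1 ≤ r + k ∧ r + k + 2 ≤ r + m)) = (decide (1 ≤ k ∧ k + 2 ≤ m)) by
      exact decide_eq_decide.mpr g2]
    rw [show (decide (r + k + 3 ≤ r + m)) = (decide (k + 3 ≤ m)) by
      exact decide_eq_decide.mpr eg3]
  · interval_cases k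
    · -- k = 0: left and middle windows dead on both sides
      have e2 : r + 0 - 1 < r := by omega
      have f2 : (if r + 0 - 1 < r then x else rest.getD (r + 0 - 1 - r) 0) = x := if_pos e2
      simp only [f2]
      rw [show (decide (r + 0 + 3 ≤ r + m)) = (decide (0 + 3 ≤ m)) by
        exact decide_eq_decide.mpr (by omega)]
      simp [hP, show ¬ (1 ≤ (0:Nat)) by omega]
    · -- k = 1: left window dead on both sides, middle/right shift
      have e1 : r + 1 - 2 < r := by omega
      have e2 : ¬ (r + 1 - 1 < r) := by omega
      have f2 : r + 1 - 1 - r = 0 := by omega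
      simp only [if_pos e1, if_neg e2, f2]
      have hB : ((x == rest[0]?.getD 0) = false) := by
        rw [List.getD_eq_getElem?_getD] at hrest0
        exact beq_eq_false_iff_ne.mpr (fun h => (beq_eq_false_iff_ne.mp hrest0) h.symm)
      rw [show (decide (1 ≤ r + 1 ∧ r + 1 + 2 ≤ r + m)) = (decide (1 ≤ 1 ∧ 1 + 2 ≤ m)) by
        exact decide_eq_decide.mpr (by omega)]
      rw [show (decide (r + 1 + 3 ≤ r + m)) = (decide (1 + 3 ≤ m)) by
        exact decide_eq_decide.mpr (by omega)]
      simp [hB, show ¬ (2 ≤ (1:Nat)) by omega]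

-- the window mask equals the run mask
theorem pvWindow_eq_mask_aux : ∀ (fuel : Nat) (col : List Int), col.length ≤ fuel →
    (List.range col.length).map (fun i => pvBoom col col.length i) = (pvMaskD col).1 := by
  intro fuel
  induction fuel with
  | zero =>
    intro col hc
    have : col = [] := List.eq_nil_of_length_eq_zero (by omega)
    subst this; simp [pvMaskD]
  | succ fuel ih =>
    intro col hc
    cases col with
    | nil => simp [pvMaskD]
    | cons x xs =>
      set tw := (xs.takeWhile (fun y => y == x)).length with htw
      set rest := xs.dropWhile (fun y => y == x) with hrest
      set r := tw + 1 with hrr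
      set m := rest.length with hmm
      have hsplit : x :: xs = List.replicate r x ++ rest := by
        rw [hrr, List.replicate_succ]
        simp only [List.cons_append]
        congr 1
        conv_lhs => rw [← List.takeWhile_append_dropWhile (p := fun y => y == x) (l := xs)]
        rw [← hrest]
        congr 1
        rw [htw]
        exact pv_takeWhile_replicate x xs
      have hlen : (x :: xs).length = r + m := by
        rw [hsplit]; simp [← hmm]
      have hhead : rest ≠ [] → rest.getD 0 0 ≠ x := fun h => pv_dropWhile_head_ne x xs h
      have hmfuel : m ≤ fuel := by
        have := List.length_dropWhile_le (fun y => y == x) xs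
        simp at hc
        rw [hmm, hrest]
        omega
      have hmaskcons : (pvMaskD (x :: xs)).1 =
          List.replicate r (decide (x ≠ 0 ∧ 3 ≤ r)) ++ (pvMaskD rest).1 := by
        rw [pvMaskD]
        simp only [← htw, ← hrest, ← hrr]
        by_cases hcnd : x ≠ 0 ∧ 3 ≤ r
        · rw [if_pos hcnd, decide_eq_true hcnd]
        · rw [if_neg hcnd, decide_eq_false hcnd]
      rw [hmaskcons]
      apply List.ext_getElem
      · simp [pvMaskD_length rest, hlen, ← hmm]
      · intro i h1 h2
        have hi : i < r + m := by
          simp only [List.length_map, List.length_range] at h1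
          omega
        have hmlen : (pvMaskD rest).1.length = m := pvMaskD_length rest
        rw [List.getElem_map, List.getElem_range]
        by_cases hir : i < r
        · rw [List.getElem_append_left (by simpa using hir)]
          rw [hlen, hsplit]
          rw [pvBoom_run x r m rest (by omega) hmm.symm hhead i hir]
          simp
        · obtain ⟨k, rfl⟩ : ∃ k, i = r + k := ⟨i - r, by omega⟩
          have hk : k < m := by omega
          rw [List.getElem_append_right (by simpa using Nat.le_of_not_lt hir)]
          rw [hlen, hsplit, pvBoom_shift x r m rest (by omega) hmm.symm hhead k hk]
          have hbs := ih rest hmfuel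
          have := congrArg (fun l => l[k]?) hbs
          simp only [List.getElem?_map] at this
          rw [List.getElem?_eq_getElem (by simp [← hmm]; omega)] at this
          rw [List.getElem?_eq_getElem (by omega : k < (pvMaskD rest).1.length)] at this
          simp only [Option.map_some, Option.some_inj, List.getElem_range] at this
          simp only [List.length_replicate, Nat.add_sub_cancel_left]
          rw [← hmm] at this
          exact this

theorem pvWindow_eq_mask (col : List Int) :
    (List.range col.length).map (fun i => pvBoom col col.length i) = (pvMaskD col).1 :=
  pvWindow_eq_mask_aux col.length col (le_refl _)

-- sum of booleans as foldl
theorem pvSumB_acc (l : List Bool) : ∀ (a : Int),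
    l.foldl (fun a b => a + (if b then (1 : Int) else 0)) a =
      a + l.foldl (fun a b => a + (if b then (1 : Int) else 0)) 0 := by
  induction l with
  | nil => intro a; simp
  | cons b bs ih =>
    intro a
    simp only [List.foldl_cons]
    rw [ih (a + _), ih (0 + _)]
    ring

theorem pvSumB_replicate (r : Nat) (b : Bool) :
    (List.replicate r b).foldl (fun a c => a + (if c then (1 : Int) else 0)) 0 =
      if b then (r : Int) else 0 := by
  induction r with
  | zero => simp
  | succ r ih =>
    rw [List.replicate_succ, List.foldl_cons, pvSumB_acc, ih]
    cases b <;> simp <;> ring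

-- A's destroyed count equals the boolean sum of the mask
theorem pvMaskD_snd_eq_sum_aux : ∀ (fuel : Nat) (l : List Int), l.length ≤ fuel →
    (pvMaskD l).2 = (pvMaskD l).1.foldl (fun a b => a + (if b then (1 : Int) else 0)) 0 := by
  intro fuel
  induction fuel with
  | zero =>
    intro l hl
    have : l = [] := List.eq_nil_of_length_eq_zero (by omega)
    subst this; simp [pvMaskD]
  | succ fuel ih =>
    intro l hl
    cases l with
    | nil => simp [pvMaskD]
    | cons x xs =>
      have hd : (xs.dropWhile (fun y => y == x)).length ≤ fuel := by
        have := List.length_dropWhile_le (fun y => y == x) xs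
        simp at hl; omega
      have hrec := ih (xs.dropWhile (fun y => y == x)) hd
      rw [pvMaskD]
      split
      · simp only
        rw [List.foldl_append, pvSumB_replicate, pvSumB_acc, hrec]
        simp
      · simp only
        rw [List.foldl_append, pvSumB_replicate, pvSumB_acc, hrec]
        simp

theorem pvMaskD_snd_eq_sum (l : List Int) :
    (pvMaskD l).2 = (pvMaskD l).1.foldl (fun a b => a + (if b then (1 : Int) else 0)) 0 :=
  pvMaskD_snd_eq_sum_aux l.length l (le_refl _)

-- B computes the same triple
theorem explode_column_alt_eq_mask (col : List Int) :
    explode_column_alt col =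
      (List.zipWith (fun b c => if b then 0 else c) (pvMaskD col).1 col,
       (pvMaskD col).2, (pvMaskD col).1.any id) := by
  unfold explode_column_alt
  simp only [pvWindow_eq_mask col]
  rw [pvMaskD_snd_eq_sum]

-- ===== VERDICT (by name: the statement is the Claim_ definition above) =====
theorem explode_column_spec : Claim_equal_explode_column := by
  intro col _
  unfold Spec_explode_column
  rw [explode_column_eq_mask, explode_column_alt_eq_mask]
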